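/- PORTED by tools/port_fixed.py from Prog/Jsmn/D/ParseEntry.lean to THE FIXED IMAGE fixed/jsmn_d.bin (same bytes at the same addresses; binFDc). Do not edit: edit the original and port again. -/
/-
  jsmn_d.bin: `jsmn_parse`, the prologue (10027AH – 10029DH, 14 instructions) and the epilogue (100529H – 10053AH, 9 instructions).
-/
import Prog.Jsmn.Fixed.Specs
import Prog.Jsmn.Fixed.CodeFD
import Prog.Jsmn.Fixed.D.ParseLemmas
namespace X86
namespace J6
namespace FD
open X86.User (CodeAt RegsKept Span FlagsOK Layout toNat_add_ofNat toNat_ofNat_lt' add_ofNat_add)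
open Jsmn JsmnFDBytes

set_option maxRecDepth 100000
set_option maxHeartbeats 4000000
set_option linter.unusedSimpArgs false
set_option linter.unusedVariables false

theorem entry_spec (n : User.Layout) : EntrySpec n := by
  intro c v0 he
  have hW := he.pre.toksW
  v3_open he hW
  j6f_bin
  have hcode := JsmnFD.tjfd_jsmn_parse_core_code he_pre_call_img
  have j1 : ((233 : Nat) == 235) = false := by decide
  have j2 : ((233 : UInt8) == 235) = false := by decide
  have j3 : ((233 : UInt64) == 235) = false := by decide
  v3_walk hcode he.pre.call.fetch [j1, j2, j3] until [0x10046b]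
  refine Reach.done ⟨by simp, ⟨?_, ?_, i32_range _, he.inv⟩⟩
  · refine ⟨he, by v3_regnorm, by v3_regnorm, by v3_regnorm, by v3_regnorm, by v3_regnorm, ?_, by v3_read, by v3_read, by v3_read, by v3_read, by v3_read, by v3_read,
      by v3_frame he_pre_call_retAddr, by unfold dataWins; v3_same, by v3_frame he.pre.parser, ?_, Iff.rfl⟩
    · rw [he_r8]
      have : (UInt64.ofNat c.numTokens).toNat = c.numTokens := by v3_omega
      rw [this]; v3_read
    · show ToksArg Config.default _ c.tb c.numTokens c.toks0
      v3_frame he_pre_toksArg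
  · v3_regnorm
    rw [u32_i32_nat _ he_inv_toknextR]
    v3_omega

theorem epilogue_spec (n : User.Layout) : EpilogueSpec n := by
  intro c v0 v r s ⟨hrip, hf, hr15⟩
  have hcode := hf.code
  v3_open hf
  j6f_bin
  v3_walk hcode hf.entry.pre.call.fetch [hf_entry_pre_call_retAddr, hf_entry_pre_call_retlt]
  refine Reach.done ⟨⟨by simp, by v3_regnorm, calleeSaved_of_six ?_ ?_ ?_ ?_ ?_ ?_, ?_⟩, ?_, ?_, ?_⟩
  iterate 6 (v3_regnorm; exact UInt64.ofNat_toNat)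
  · v3_memnorm; exact hf.same
  · unfold RetInt; v3_regnorm; exact hr15
  · v3_memnorm; exact hf.parser
  · v3_memnorm; exact hf.toksArg

end FD
end J6
end X86
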